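-- pv_equiv track=rewrite | github.com/Xinlong-Chen/COVID-19 | COVID_19Analyse/views/DataImpl/api/data/TodayDataImpl.py | __delDict
-- ===== SOURCE A (Python) =====
-- def __delDict(dict,keyList):
--     keyTmp = []
--     for key in dict:
--         keyTmp.append(key)
--     for key in keyTmp:
--         if key not in keyList:
--             try:
--                 del dict[key]
--             except:
--                 pass
--     return dict
-- ===== SOURCE B (Python) =====
-- def __delDict(dict, keyList):
--     keep = set(keyList)
--     items = list(dict.items())
--     dict.clear()
--     for k, v in items:
--         if k in keep:
--             dict[k] = v
--     return dict
-- ===== Notes on version B (the rewrite author's own statement) =====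
-- stated objective: alternative
-- what changed: Instead of snapshotting keys and deleting unwanted entries one by one with try/except, B empties the dict and rebuilds it in place from the saved items, re-inserting only keys found in a set built once from keyList (O(1) membership instead of a list scan per key).
import Mathlib
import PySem

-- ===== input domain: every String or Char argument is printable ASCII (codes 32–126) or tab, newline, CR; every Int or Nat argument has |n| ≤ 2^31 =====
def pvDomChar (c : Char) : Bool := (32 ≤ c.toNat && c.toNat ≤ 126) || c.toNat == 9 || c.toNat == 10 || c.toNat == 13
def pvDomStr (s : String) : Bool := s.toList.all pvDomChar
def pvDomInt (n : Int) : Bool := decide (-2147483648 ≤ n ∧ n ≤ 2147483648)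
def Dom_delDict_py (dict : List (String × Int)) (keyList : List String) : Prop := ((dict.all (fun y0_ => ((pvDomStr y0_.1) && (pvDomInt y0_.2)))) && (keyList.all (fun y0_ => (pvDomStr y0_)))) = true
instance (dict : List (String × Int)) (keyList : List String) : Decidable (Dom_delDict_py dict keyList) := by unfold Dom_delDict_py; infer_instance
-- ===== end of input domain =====

-- B replaces A's snapshot-keys-then-delete-each loop by clearing the dict and rebuilding it
-- in place from the saved items, re-inserting only keys present in a set built from keyList;
-- the same object is mutated and returned, the equivalence proved is about the returned
-- contents. Objective: alternative (set membership instead of a per-key list scan).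

-- ===== PORT A =====
-- Port of A: snapshot the keys, then for each key not in keyList delete it from the
-- dict (deletion = remove the entry with that key; a missing key is a no-op, as the
-- try/except makes Python's del).
def delDict_py (dict : List (String × Int)) (keyList : List String) : List (String × Int) :=
  let keyTmp := dict.map Prod.fst
  keyTmp.foldl (fun d key => if key ∈ keyList then d else d.filter (fun kv => kv.1 ≠ key)) dict

-- ===== PORT B =====
-- B's rebuild loop: 'for k, v in items: if k in keep: dict[k] = v' starting from the
-- cleared dict; since the snapshot's keys are the distinct dict keys in order, each
-- insertion is an append of a fresh key.
def rebuild (keep : PySem.Set String) : List (String × Int) → List (String × Int)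
  | [] => []
  | kv :: rest =>
      if PySem.Set.contains keep kv.1 then kv :: rebuild keep rest else rebuild keep rest

def delDict_py_alt (dict : List (String × Int)) (keyList : List String) : List (String × Int) :=
  rebuild (PySem.Set.ofList keyList) dict

-- ===== PRECONDITION & SPEC =====
def Spec_delDict_py (dict : List (String × Int)) (keyList : List String) (out : List (String × Int)) : Prop := out = delDict_py_alt dict keyList
instance (dict : List (String × Int)) (keyList : List String) (out : List (String × Int)) : Decidable (Spec_delDict_py dict keyList out) := by unfold Spec_delDict_py; infer_instance

-- ===== CLAIM (what is proved, stated in full; the proofs are below) =====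
def Claim_equal_delDict_py : Prop := ∀ (dict : List (String × Int)) (keyList : List String), Dom_delDict_py dict keyList → Spec_delDict_py dict keyList (delDict_py dict keyList)

-- ===== LEMMAS AND PROOFS =====

-- Folding the per-key deletions over any key snapshot ks leaves exactly the pairs whose
-- key is in keyList or absent from ks.
theorem foldl_del (keyList : List String) : ∀ (ks : List String) (d : List (String × Int)),
    ks.foldl (fun d key => if key ∈ keyList then d else d.filter (fun kv => kv.1 ≠ key)) d
      = d.filter (fun kv => decide (kv.1 ∈ keyList ∨ kv.1 ∉ ks)) := by
  intro ks
  induction ks with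
  | nil => intro d; simp
  | cons k ks ih =>
    intro d
    simp only [List.foldl_cons]
    by_cases hk : k ∈ keyList
    · simp only [if_pos hk, ih]
      apply List.filter_congr
      intro kv _
      by_cases h1 : kv.1 ∈ keyList
      · simp [h1]
      · have : kv.1 ≠ k := fun h => h1 (h ▸ hk)
        simp [h1, this]
    · simp only [if_neg hk, ih, List.filter_filter]
      apply List.filter_congr
      intro kv _
      by_cases h1 : kv.1 = k
      · subst h1; simp [hk]
      · simp [h1]

-- B's rebuild is the membership filter.
theorem rebuild_eq_filter (keyList : List String) : ∀ (d : List (String × Int)),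
    rebuild (PySem.Set.ofList keyList) d = d.filter (fun kv => decide (kv.1 ∈ keyList)) := by
  intro d
  induction d with
  | nil => rfl
  | cons kv rest ih =>
    simp only [rebuild, List.filter_cons, ih]
    by_cases h : kv.1 ∈ keyList
    · simp [PySem.Set.contains, h, PySem.Set.mem_ofList]
    · simp [PySem.Set.contains, h, PySem.Set.mem_ofList]

-- ===== VERDICT (by name: the statement is the Claim_ definition above) =====
theorem delDict_py_spec : Claim_equal_delDict_py := by
  intro dict keyList _
  unfold Spec_delDict_py delDict_py delDict_py_alt
  rw [foldl_del, rebuild_eq_filter]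
  apply List.filter_congr
  intro kv hkv
  have : kv.1 ∈ dict.map Prod.fst := List.mem_map_of_mem hkv
  simp [this]
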